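-- pv_equiv track=rewrite | github.com/Oscar-Wilde-1/FinancialAnalysis | trend.py | min_search
-- ===== SOURCE A (Python) =====
-- def min_search(seq):
--     tempMin = seq[0]
--     tempLoc = 0
--     for i in range(1, len(seq), 1):
--         if seq[i] <= tempMin:
--             tempMin = seq[i]
--             tempLoc = i
--     return tempMin, tempLoc
-- ===== SOURCE B (Python) =====
-- def min_search(seq):
--     mn = seq[0]
--     for v in seq[1:]:
--         if v < mn:
--             mn = v
--     return mn, len(seq) - 1 - seq[::-1].index(mn)
-- ===== Notes on version B (the rewrite author's own statement) =====
-- stated objective: alternative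
-- what changed: Replaces A's single index-tracking pass with a build-the-minimum value pass (strict <) followed by locating the last occurrence of that minimum via reversed .index; no index bookkeeping in the scan.
import Mathlib
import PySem

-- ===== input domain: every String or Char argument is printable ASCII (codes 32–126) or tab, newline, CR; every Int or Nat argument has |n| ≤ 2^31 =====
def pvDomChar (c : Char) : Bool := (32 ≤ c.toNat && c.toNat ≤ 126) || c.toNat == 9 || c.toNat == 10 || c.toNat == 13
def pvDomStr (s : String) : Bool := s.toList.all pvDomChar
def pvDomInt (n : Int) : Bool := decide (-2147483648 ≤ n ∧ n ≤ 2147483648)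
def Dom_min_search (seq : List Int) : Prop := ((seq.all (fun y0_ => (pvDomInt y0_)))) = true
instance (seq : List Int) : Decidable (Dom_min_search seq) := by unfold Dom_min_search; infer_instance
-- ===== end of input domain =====

-- B computes the minimum value first (strict <), then locates its last index via the
-- reversed-list .index — an alternative decomposition of A's single index-tracking pass.


-- ===== PORT A =====
-- tempMin = seq[0]; tempLoc = 0; for i in range(1, len(seq), 1): if seq[i] <= tempMin: update
def min_search (seq : List Int) : Int × Int :=
  match seq with
  | [] => (0, 0)   -- unreachable under Pre_: Python raises IndexError on seq[0]
  | x :: _ =>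
    (PySem.List.pyRange 1 (PySem.List.len seq) 1).foldl
      (fun st i =>
        if PySem.List.pyGetD seq i 0 ≤ st.1 then (PySem.List.pyGetD seq i 0, i) else st)
      (x, 0)

-- ===== PORT B =====
-- mn = seq[0]; for v in seq[1:]: if v < mn: mn = v; return mn, len(seq)-1-seq[::-1].index(mn)
def min_search_alt (seq : List Int) : Int × Int :=
  match seq with
  | [] => (0, 0)   -- unreachable under Pre_: Python raises IndexError on seq[0]
  | x :: _ =>
    let mn := (PySem.List.slice seq (some 1) none).foldl (fun m v => if v < m then v else m) x
    let rev := (PySem.List.slice? seq none none (-1)).getD []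
    (mn, PySem.List.len seq - 1 - (((PySem.List.index? rev mn).getD 0 : Nat) : Int))

-- ===== PRECONDITION & SPEC =====
-- Pre_ excludes only the empty list, on which both Pythons raise IndexError at seq[0].
def Pre_min_search (seq : List Int) : Prop := seq ≠ []
instance (seq : List Int) : Decidable (Pre_min_search seq) := by unfold Pre_min_search; infer_instance
def pvWitness_min_search : List Int := ([0])
def Spec_min_search (seq : List Int) (out : Int × Int) : Prop := out = min_search_alt seq
instance (seq : List Int) (out : Int × Int) : Decidable (Spec_min_search seq out) := by unfold Spec_min_search; infer_instance

-- ===== CLAIM (what is proved, stated in full; the proofs are below) =====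
def Claim_equal_min_search : Prop := ∀ (seq : List Int), Dom_min_search seq → Pre_min_search seq → Spec_min_search seq (min_search seq)

-- ===== LEMMAS AND PROOFS =====

-- structural version of A's loop (proof helper only)
def auxFold : List Int → Int → (Int × Int) → (Int × Int)
  | [], _, st => st
  | v :: vs, j, st => auxFold vs (j + 1) (if v ≤ st.1 then (v, j) else st)

theorem foldl_min_mem (l : List Int) (m : Int) :
    l.foldl (fun m v => if v < m then v else m) m ∈ m :: l := by
  induction l generalizing m with
  | nil => simp
  | cons v vs ih =>
    simp only [List.foldl_cons]
    by_cases hv : v < m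
    · rw [if_pos hv]
      rcases List.mem_cons.mp (ih v) with h | h <;> simp [h]
    · rw [if_neg hv]
      rcases List.mem_cons.mp (ih m) with h | h <;> simp [h]

theorem auxFold_concat (rs : List Int) (v : Int) (j : Int) (st : Int × Int) :
    auxFold (rs ++ [v]) j st =
      (if v ≤ (auxFold rs j st).1 then (v, j + rs.length) else auxFold rs j st) := by
  induction rs generalizing j st with
  | nil => simp [auxFold]
  | cons w ws ih =>
    simp only [List.cons_append, auxFold, ih]
    have : j + 1 + (ws.length : Int) = j + (w :: ws).length := by simp; omega
    rw [this]

theorem min_search_eq_auxFold (seq : List Int) :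
    ∀ (d : List Int) (j : Int) (st : Int × Int), 0 ≤ j → seq.drop j.toNat = d →
    (PySem.List.pyRange j (PySem.List.len seq) 1).foldl
      (fun st i =>
        if PySem.List.pyGetD seq i 0 ≤ st.1 then (PySem.List.pyGetD seq i 0, i) else st)
      st = auxFold d j st := by
  intro d
  induction d with
  | nil =>
    intro j st hj hd
    have hlen : seq.length ≤ j.toNat := by
      by_contra h
      have := List.drop_eq_nil_iff.mp hd
      omega
    have hnil : PySem.List.pyRange j ((seq.length : Int)) 1 = [] :=
      PySem.List.pyRange_one_eq_nil (by omega)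
    simp [PySem.List.len_eq, hnil, auxFold]
  | cons v vs ih =>
    intro j st hj hd
    have hlt : j.toNat < seq.length := by
      have h1 := congrArg List.length hd
      simp [List.length_drop] at h1
      omega
    have hjl : j < PySem.List.len seq := by simp [PySem.List.len_eq]; omega
    rw [PySem.List.pyRange_one_cons hjl, List.foldl_cons]
    have hv : seq[j.toNat]'hlt = v := by
      have h2 : (seq.drop j.toNat)[0]'(by simp [hd]) = v := by simp [hd]
      rw [List.getElem_drop] at h2
      simpa using h2
    have hget : PySem.List.pyGetD seq j 0 = v := by
      rw [PySem.List.pyGetD_eq_getElem seq 0 hj (by omega)]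
      exact hv
    have hdrop : seq.drop (j + 1).toNat = vs := by
      have h3 : (j + 1).toNat = j.toNat + 1 := by omega
      rw [h3, ← List.drop_drop, hd]
      simp
    rw [hget]
    simp only [auxFold]
    exact ih (j + 1) (if v ≤ st.1 then (v, j) else st) (by omega) hdrop

theorem auxFold_eq_alt (x : Int) (rest : List Int) :
    auxFold rest 1 (x, 0) = min_search_alt (x :: rest) := by
  induction rest using List.reverseRecOn with
  | nil =>
    simp only [auxFold, min_search_alt, PySem.List.slice_from_one, List.tail_cons,
      PySem.List.slice?_none_none_neg_one, Option.getD_some, List.foldl_nil,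
      List.reverse_cons, List.reverse_nil, List.nil_append,
      PySem.List.index?_cons_self, PySem.List.len_eq]
    simp
  | append_singleton rs v ih =>
    set mn := rs.foldl (fun m v => if v < m then v else m) x with hmn
    have hmem : mn ∈ (x :: rs).reverse := by
      rw [List.mem_reverse]; exact foldl_min_mem rs x
    obtain ⟨k, hk⟩ : ∃ k, PySem.List.index? (x :: rs).reverse mn = some k :=
      Option.isSome_iff_exists.mp ((PySem.List.index?_isSome_iff ((x :: rs).reverse) mn).mpr hmem)
    have haltold : min_search_alt (x :: rs) = (mn, ((x :: rs).length : Int) - 1 - (k : Int)) := by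
      simp only [min_search_alt, PySem.List.slice_from_one, List.tail_cons,
        PySem.List.slice?_none_none_neg_one, Option.getD_some, PySem.List.len_eq, ← hmn, hk]
    have hrev : (x :: (rs ++ [v])).reverse = v :: (x :: rs).reverse := by simp
    rw [auxFold_concat, ih, haltold]
    by_cases hle : v ≤ mn
    · -- v becomes (or ties) the minimum: it is found at position 0 of the reversed list
      have hmn' : (rs ++ [v]).foldl (fun m v => if v < m then v else m) x = v := by
        rw [List.foldl_append, ← hmn]
        simp only [List.foldl_cons, List.foldl_nil]
        split_ifs <;> omega
      simp only [min_search_alt, PySem.List.slice_from_one, List.tail_cons,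
        PySem.List.slice?_none_none_neg_one, Option.getD_some, PySem.List.len_eq, hmn', hrev,
        PySem.List.index?_cons_self]
      rw [if_pos hle]
      simp only [List.length_cons, List.length_append, List.length_cons,
        List.length_nil]
      refine Prod.ext rfl ?_
      push_cast
      ring
    · -- v is larger than the minimum: the minimum and its last position are unchanged
      have hne : v ≠ mn := by omega
      have hmn' : (rs ++ [v]).foldl (fun m v => if v < m then v else m) x = mn := by
        rw [List.foldl_append, ← hmn]
        simp only [List.foldl_cons, List.foldl_nil]
        split_ifs <;> omega
      simp only [min_search_alt, PySem.List.slice_from_one, List.tail_cons,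
        PySem.List.slice?_none_none_neg_one, Option.getD_some, PySem.List.len_eq, hmn', hrev]
      rw [PySem.List.index?_cons_of_ne _ hne, hk, if_neg hle]
      simp only [Option.map_some, Option.getD_some, List.length_cons, List.length_append,
        List.length_cons, List.length_nil]
      refine Prod.ext rfl ?_
      push_cast
      ring

-- ===== VERDICT (by name: the statement is the Claim_ definition above) =====
theorem min_search_spec : Claim_equal_min_search := by
  intro seq _ hpre
  unfold Spec_min_search
  match seq, hpre with
  | x :: rest, _ =>
    show (PySem.List.pyRange 1 (PySem.List.len (x :: rest)) 1).foldl _ (x, 0) = _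
    rw [min_search_eq_auxFold (x :: rest) rest 1 (x, 0) (by omega) (by simp)]
    exact auxFold_eq_alt x rest
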